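-- pv_equiv track=rewrite | github.com/bhattadiCS/research-thesis-overthinking-boundary | research/trace_analysis.py | _answer_streak
-- ===== SOURCE A (Python) =====
-- def _answer_streak(values: list[str]) -> list[int]:
--     streaks: list[int] = []
--     current = 0
--     previous = None
--     for value in values:
--         if value and value == previous:
--             current += 1
--         else:
--             current = 1
--         streaks.append(current)
--         previous = value
--     return streaks
-- ===== SOURCE B (Python) =====
-- def _answer_streak(values: list[str]) -> list[int]:
--     # Group values into maximal runs of consecutive equal elements, then
--     # emit 1..n for a truthy run and n ones for a falsy (empty-string) run.
--     runs: list[list] = []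
--     for v in values:
--         if runs and runs[-1][0] == v:
--             runs[-1][1] += 1
--         else:
--             runs.append([v, 1])
--     out: list[int] = []
--     for v, n in runs:
--         out.extend(range(1, n + 1) if v else [1] * n)
--     return out
-- ===== Notes on version B (the rewrite author's own statement) =====
-- stated objective: alternative
-- what changed: Replaces the stateful single scan carrying (current, previous) with a two-phase group-then-generate pass: first build maximal runs of consecutive equal values, then emit 1..n per non-empty run and n ones per empty-string run.
import Mathlib
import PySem

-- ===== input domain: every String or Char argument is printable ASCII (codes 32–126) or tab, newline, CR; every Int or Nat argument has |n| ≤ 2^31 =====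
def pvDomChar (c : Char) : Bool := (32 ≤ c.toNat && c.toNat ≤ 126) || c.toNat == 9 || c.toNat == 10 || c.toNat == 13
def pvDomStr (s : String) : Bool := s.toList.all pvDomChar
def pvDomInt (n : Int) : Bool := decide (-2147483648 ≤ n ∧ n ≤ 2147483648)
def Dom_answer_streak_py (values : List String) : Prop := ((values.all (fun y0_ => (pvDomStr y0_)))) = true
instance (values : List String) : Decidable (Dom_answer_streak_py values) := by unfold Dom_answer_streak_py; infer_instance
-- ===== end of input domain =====

-- B replaces A's stateful single scan (current streak + previous value) by a two-phase
-- group-then-generate pass: build maximal runs of consecutive equal values, then emit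
-- 1..n per non-empty run and n ones per empty-string run. Objective: alternative.

-- ===== PORT A =====
-- loop body of A's single scan: state = (streaks, current, previous)
def pvStepA (st : List Int × Int × Option String) (value : String) :
    List Int × Int × Option String :=
  if value ≠ "" ∧ some value = st.2.2 then
    (st.1 ++ [st.2.1 + 1], st.2.1 + 1, some value)
  else
    (st.1 ++ [(1 : Int)], (1 : Int), some value)

def answer_streak_py (values : List String) : List Int :=
  (values.foldl pvStepA ([], 0, none)).1

-- ===== PORT B =====
-- phase 1 loop body: extend the last run or start a new one
def pvStepB (runs : List (String × Int)) (v : String) : List (String × Int) :=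
  match runs.getLast? with
  | some (u, n) => if u = v then runs.dropLast ++ [(u, n + 1)] else runs ++ [(v, 1)]
  | none => runs ++ [(v, 1)]

-- phase 2: what one run (value, length) contributes to the output
def pvExpand (p : String × Int) : List Int :=
  if p.1 ≠ "" then PySem.List.pyRange 1 (p.2 + 1) 1 else List.replicate p.2.toNat 1

def answer_streak_py_alt (values : List String) : List Int :=
  let runs := values.foldl pvStepB []
  runs.foldl (fun out p => out ++ pvExpand p) []

-- ===== PRECONDITION & SPEC =====
def Spec_answer_streak_py (values : List String) (out : List Int) : Prop := out = answer_streak_py_alt values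
instance (values : List String) (out : List Int) : Decidable (Spec_answer_streak_py values out) := by unfold Spec_answer_streak_py; infer_instance

-- ===== CLAIM (what is proved, stated in full; the proofs are below) =====
def Claim_equal_answer_streak_py : Prop := ∀ (values : List String), Dom_answer_streak_py values → Spec_answer_streak_py values (answer_streak_py values)

-- ===== LEMMAS AND PROOFS =====

theorem expand_snoc_of_ne (u : String) (n : Int) (hu : u ≠ "") (hn : 1 ≤ n) :
    pvExpand (u, n + 1) = pvExpand (u, n) ++ [n + 1] := by
  simp only [pvExpand, if_pos (by simpa using hu)]
  have := PySem.List.pyRange_one_succ_right (a := 1) (b := n + 1) (by omega)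
  simpa using this

theorem expand_snoc_of_empty (n : Int) (hn : 1 ≤ n) :
    pvExpand ("", n + 1) = pvExpand ("", n) ++ [(1 : Int)] := by
  simp [pvExpand]
  have h1 : (n + 1).toNat = n.toNat + 1 := by omega
  rw [h1, List.replicate_succ']

theorem expand_one (v : String) : pvExpand (v, 1) = [(1 : Int)] := by
  by_cases hv : v = ""
  · simp [pvExpand, hv]
  · have h2 : PySem.List.pyRange 1 2 1 = [1] := by decide
    simp [pvExpand, hv, h2]

theorem stepB_snoc (rs : List (String × Int)) (u : String) (n : Int) (v : String) :
    pvStepB (rs ++ [(u, n)]) v =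
      if u = v then rs ++ [(u, n + 1)] else rs ++ [(u, n)] ++ [(v, 1)] := by
  simp [pvStepB]

-- the main invariant: after consuming a prefix, A's (streaks, current, previous) state is
-- determined by B's current run list rs ++ [(u, n)]
theorem main_inv (l : List String) (rs : List (String × Int)) (u : String) (n : Int)
    (hn : 1 ≤ n) :
    (l.foldl pvStepA ((rs ++ [(u, n)]).foldl (fun out p => out ++ pvExpand p) [],
        (if u ≠ "" then n else 1), some u)).1
      = (l.foldl pvStepB (rs ++ [(u, n)])).foldl (fun out p => out ++ pvExpand p) [] := by
  induction l generalizing rs u n with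
  | nil => simp
  | cons v l ih =>
    simp only [List.foldl_cons, stepB_snoc]
    by_cases huv : u = v
    · subst huv
      rw [if_pos rfl]
      by_cases hu : u = ""
      · subst hu
        have hA : pvStepA (((rs ++ [("", n)]).foldl (fun out p => out ++ pvExpand p) []),
            (if ("" : String) ≠ "" then n else 1), some "") ""
            = (((rs ++ [("", n + 1)]).foldl (fun out p => out ++ pvExpand p) []),
              (if ("" : String) ≠ "" then n + 1 else 1), some "") := by
          simp [pvStepA, List.foldl_append, expand_snoc_of_empty n hn]
        rw [hA]
        exact ih rs "" (n + 1) (by omega)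
      · have hA : pvStepA (((rs ++ [(u, n)]).foldl (fun out p => out ++ pvExpand p) []),
            (if u ≠ "" then n else 1), some u) u
            = (((rs ++ [(u, n + 1)]).foldl (fun out p => out ++ pvExpand p) []),
              (if u ≠ "" then n + 1 else 1), some u) := by
          simp [pvStepA, hu, List.foldl_append, expand_snoc_of_ne u n hu hn]
        rw [hA]
        exact ih rs u (n + 1) (by omega)
    · rw [if_neg huv]
      have hA : pvStepA (((rs ++ [(u, n)]).foldl (fun out p => out ++ pvExpand p) []),
          (if u ≠ "" then n else 1), some u) v
          = ((((rs ++ [(u, n)]) ++ [(v, 1)]).foldl (fun out p => out ++ pvExpand p) []),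
            (if v ≠ "" then (1 : Int) else 1), some v) := by
        have hne : ¬ (v ≠ "" ∧ some v = some u) := by
          rintro ⟨_, h⟩; exact huv (by simpa using h.symm)
        simp [pvStepA, List.foldl_append, expand_one]
        intro _ h
        exact absurd h.symm huv
      rw [hA]
      have := ih (rs ++ [(u, n)]) v 1 (by omega)
      simpa using this

-- ===== VERDICT (by name: the statement is the Claim_ definition above) =====
theorem answer_streak_py_spec : Claim_equal_answer_streak_py := by
  intro values _
  show answer_streak_py values = answer_streak_py_alt values
  cases values with
  | nil => rfl
  | cons v l =>
    simp only [answer_streak_py, answer_streak_py_alt, List.foldl_cons]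
    have hA : pvStepA ([], 0, none) v = ([(1 : Int)], (1 : Int), some v) := by
      simp [pvStepA]
    have hB : pvStepB [] v = [] ++ [(v, 1)] := by simp [pvStepB]
    rw [hA, hB]
    have := main_inv l [] v 1 (le_refl 1)
    simpa [expand_one] using this
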